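-- pv_equiv track=rewrite | github.com/jier/docsible | docsible/analyzers/complexity_analyzer/integrations/providers.py | _detect_monitoring_platform
-- ===== SOURCE A (Python) =====
-- def _detect_monitoring_platform(modules: list[str]) -> str:
--     """Detect specific monitoring platform from modules."""
--     if any("datadog" in m for m in modules):
--         return "Datadog"
--     elif any("prometheus" in m for m in modules):
--         return "Prometheus"
--     elif any("grafana" in m for m in modules):
--         return "Grafana"
--     elif any("newrelic" in m for m in modules):
--         return "New Relic"
--     elif any("nagios" in m for m in modules):
--         return "Nagios"
--     elif any("zabbix" in m for m in modules):
--         return "Zabbix"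
--     else:
--         return "Monitoring Platform"
-- ===== SOURCE B (Python) =====
-- def _detect_monitoring_platform(modules: list[str]) -> str:
--     """Detect specific monitoring platform from modules."""
--     keywords = ("datadog", "prometheus", "grafana", "newrelic", "nagios", "zabbix")
--     found = set()
--     for m in modules:
--         for kw in keywords:
--             if kw in m:
--                 found.add(kw)
--     priority = [
--         ("datadog", "Datadog"),
--         ("prometheus", "Prometheus"),
--         ("grafana", "Grafana"),
--         ("newrelic", "New Relic"),
--         ("nagios", "Nagios"),
--         ("zabbix", "Zabbix"),
--     ]
--     for kw, label in priority:
--         if kw in found: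
--             return label
--     return "Monitoring Platform"
-- ===== Notes on version B (the rewrite author's own statement) =====
-- stated objective: alternative
-- what changed: B makes a single pass over modules collecting matched keywords into a set, then resolves the label by a separate priority-table lookup, instead of A's six sequential any() rescans of the list.
import Mathlib
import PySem

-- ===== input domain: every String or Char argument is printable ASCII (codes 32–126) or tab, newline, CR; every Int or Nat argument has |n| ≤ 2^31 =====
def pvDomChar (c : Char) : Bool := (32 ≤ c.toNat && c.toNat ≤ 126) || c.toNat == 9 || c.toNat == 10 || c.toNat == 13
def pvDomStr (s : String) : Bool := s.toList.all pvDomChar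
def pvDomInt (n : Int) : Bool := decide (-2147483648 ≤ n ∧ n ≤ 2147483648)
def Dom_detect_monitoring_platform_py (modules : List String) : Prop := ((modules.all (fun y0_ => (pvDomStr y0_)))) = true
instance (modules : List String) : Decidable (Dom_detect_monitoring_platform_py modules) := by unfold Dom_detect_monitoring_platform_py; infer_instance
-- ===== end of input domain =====

-- B replaces A's six sequential any() rescans by one pass collecting matched keywords
-- into a set plus a separate priority-table lookup (alternative decomposition, same cost).


-- ===== PORT A =====
def detect_monitoring_platform_py (modules : List String) : String :=
  if modules.any (fun m => PySem.Str.isIn "datadog" m) then "Datadog"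
  else if modules.any (fun m => PySem.Str.isIn "prometheus" m) then "Prometheus"
  else if modules.any (fun m => PySem.Str.isIn "grafana" m) then "Grafana"
  else if modules.any (fun m => PySem.Str.isIn "newrelic" m) then "New Relic"
  else if modules.any (fun m => PySem.Str.isIn "nagios" m) then "Nagios"
  else if modules.any (fun m => PySem.Str.isIn "zabbix" m) then "Zabbix"
  else "Monitoring Platform"

-- ===== PORT B =====
def pvKeywords : List String := ["datadog", "prometheus", "grafana", "newrelic", "nagios", "zabbix"]

def pvPriority : List (String × String) :=
  [("datadog", "Datadog"), ("prometheus", "Prometheus"), ("grafana", "Grafana"),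
   ("newrelic", "New Relic"), ("nagios", "Nagios"), ("zabbix", "Zabbix")]

-- the single pass over modules: add every matched keyword to the found set
def pvScan (modules : List String) : PySem.Set String :=
  modules.foldl
    (fun found m =>
      pvKeywords.foldl (fun f kw => if PySem.Str.isIn kw m then PySem.Set.add f kw else f) found)
    PySem.Set.empty

-- the priority lookup over the table
def pvPick (found : PySem.Set String) : List (String × String) → String
  | [] => "Monitoring Platform"
  | (kw, label) :: rest => if PySem.Set.contains found kw then label else pvPick found rest

def detect_monitoring_platform_py_alt (modules : List String) : String :=
  pvPick (pvScan modules) pvPriority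

-- ===== PRECONDITION & SPEC =====
def Spec_detect_monitoring_platform_py (modules : List String) (out : String) : Prop := out = detect_monitoring_platform_py_alt modules
instance (modules : List String) (out : String) : Decidable (Spec_detect_monitoring_platform_py modules out) := by unfold Spec_detect_monitoring_platform_py; infer_instance

-- ===== CLAIM (what is proved, stated in full; the proofs are below) =====
def Claim_equal_detect_monitoring_platform_py : Prop := ∀ (modules : List String), Dom_detect_monitoring_platform_py modules → Spec_detect_monitoring_platform_py modules (detect_monitoring_platform_py modules)

-- ===== LEMMAS AND PROOFS =====

-- membership in the inner fold over a keyword list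
theorem pv_mem_inner (kws : List String) (f : PySem.Set String) (m x : String) :
    x ∈ kws.foldl (fun f kw => if PySem.Str.isIn kw m then PySem.Set.add f kw else f) f ↔
      x ∈ f ∨ (x ∈ kws ∧ PySem.Str.isIn x m = true) := by
  induction kws generalizing f with
  | nil => simp
  | cons k rest ih =>
    simp only [List.foldl_cons, List.mem_cons]
    by_cases h : PySem.Str.isIn k m = true
    · rw [if_pos h, ih]
      simp only [PySem.Set.mem_add]
      constructor
      · rintro ((hf | rfl) | ⟨hr, hm⟩)
        · exact Or.inl hf
        · exact Or.inr ⟨Or.inl rfl, h⟩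
        · exact Or.inr ⟨Or.inr hr, hm⟩
      · rintro (hf | ⟨(rfl | hr), hm⟩)
        · exact Or.inl (Or.inl hf)
        · exact Or.inl (Or.inr rfl)
        · exact Or.inr ⟨hr, hm⟩
    · rw [if_neg h, ih]
      constructor
      · rintro (hf | ⟨hr, hm⟩)
        · exact Or.inl hf
        · exact Or.inr ⟨Or.inr hr, hm⟩
      · rintro (hf | ⟨(rfl | hr), hm⟩)
        · exact Or.inl hf
        · exact absurd hm h
        · exact Or.inr ⟨hr, hm⟩

-- membership in the scan set
theorem pv_mem_scan (modules : List String) (x : String) :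
    x ∈ pvScan modules ↔ x ∈ pvKeywords ∧ modules.any (fun m => PySem.Str.isIn x m) = true := by
  unfold pvScan
  suffices h : ∀ (f : PySem.Set String),
      x ∈ modules.foldl
        (fun found m =>
          pvKeywords.foldl (fun f kw => if PySem.Str.isIn kw m then PySem.Set.add f kw else f) found)
        f ↔ x ∈ f ∨ (x ∈ pvKeywords ∧ modules.any (fun m => PySem.Str.isIn x m) = true) by
    simpa using h PySem.Set.empty
  intro f
  induction modules generalizing f with
  | nil => simp
  | cons m rest ih =>
    simp only [List.foldl_cons, ih, pv_mem_inner, List.any_cons, Bool.or_eq_true]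
    tauto

-- contains on the scan set, for a keyword of the table
theorem pv_contains_scan (modules : List String) (x : String) (hx : x ∈ pvKeywords) :
    PySem.Set.contains (pvScan modules) x = modules.any (fun m => PySem.Str.isIn x m) := by
  by_cases h : modules.any (fun m => PySem.Str.isIn x m) = true
  · rw [h, PySem.Set.contains_iff, pv_mem_scan]; exact ⟨hx, h⟩
  · rw [Bool.not_eq_true] at h
    rw [h]
    rw [← Bool.not_eq_true, PySem.Set.contains_iff, pv_mem_scan]
    rintro ⟨-, hc⟩
    rw [h] at hc
    cases hc

-- ===== VERDICT (by name: the statement is the Claim_ definition above) =====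
theorem detect_monitoring_platform_py_spec : Claim_equal_detect_monitoring_platform_py := by
  intro modules _
  unfold Spec_detect_monitoring_platform_py detect_monitoring_platform_py detect_monitoring_platform_py_alt pvPriority
  simp only [pvPick, pv_contains_scan modules _ (by decide : "datadog" ∈ pvKeywords),
    pv_contains_scan modules _ (by decide : "prometheus" ∈ pvKeywords),
    pv_contains_scan modules _ (by decide : "grafana" ∈ pvKeywords),
    pv_contains_scan modules _ (by decide : "newrelic" ∈ pvKeywords),
    pv_contains_scan modules _ (by decide : "nagios" ∈ pvKeywords),
    pv_contains_scan modules _ (by decide : "zabbix" ∈ pvKeywords)]
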